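-- pv_equiv track=rewrite | github.com/abdullahau/Python-Programming-MOOC | 0 - Introduction to Programming Notes/Part 4 - More strings and lists.py | longest_series_of_neighbours
-- ===== SOURCE A (Python) =====
-- def longest_series_of_neighbours(my_list: list):
--     longest = 1 # the lowest value of the longest neighbour sequence cannot be lower than 1
--     result = 1 # given that the lowest value possible is 1 and the counter is always added up N times (N+1 = neighbour series length) which is 1 less than the neighbour series length, starting the counter with 1 helps.
--     for i in range(1, len(my_list)): # range is 1 less than the length of the original list to factor the reduced length of the increment list.
--         # function abs calculates the absolute value
--         if abs(my_list[i-1]-my_list[i]) == 1: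
--             result += 1
--         else:
--             result = 1
--         # function max returns the highest of the parameters
--         longest = max(longest, result)
--     return longest
-- ===== SOURCE B (Python) =====
-- def longest_series_of_neighbours(my_list: list):
--     # Two phases: build the list of "neighbour" flags between adjacent elements,
--     # then find the longest run of consecutive flags by jumping over whole runs.
--     flags = [abs(x - y) == 1 for x, y in zip(my_list, my_list[1:])]
--     n = len(flags)
--     best = 0
--     i = 0
--     while i < n:
--         if flags[i]:
--             j = i + 1
--             while j < n and flags[j]:
--                 j += 1
--             best = max(best, j - i)
--             i = j
--         else:
--             i += 1
--     return best + 1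
-- ===== Notes on version B (the rewrite author's own statement) =====
-- stated objective: alternative
-- what changed: B separates the work into two phases: first it builds the list of adjacency flags (|x-y|==1) for each consecutive pair, then it scans that flag list run by run (an inner loop consuming each whole run of flags at once) instead of A's single inline counter-with-reset over indices.
import Mathlib
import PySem

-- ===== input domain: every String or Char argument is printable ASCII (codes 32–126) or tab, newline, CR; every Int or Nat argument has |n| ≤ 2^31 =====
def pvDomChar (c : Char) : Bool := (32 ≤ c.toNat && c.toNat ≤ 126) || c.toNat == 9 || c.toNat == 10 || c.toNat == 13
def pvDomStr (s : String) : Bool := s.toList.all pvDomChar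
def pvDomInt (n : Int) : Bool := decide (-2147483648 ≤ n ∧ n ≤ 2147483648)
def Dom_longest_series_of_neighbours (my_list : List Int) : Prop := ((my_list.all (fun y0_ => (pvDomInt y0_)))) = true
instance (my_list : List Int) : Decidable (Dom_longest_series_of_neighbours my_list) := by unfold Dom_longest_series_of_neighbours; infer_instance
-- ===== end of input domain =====

-- B reorganises A's inline counter into two phases (adjacency-flag list, then a run-by-run scan);
-- the equivalence below is about the return value (neither program mutates its argument).

-- ===== PORT A =====
-- literal port of A: one foldl over range(1, len), state (longest, result);
-- indices are always in range, so pyGetD with default 0 is exact here.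
def longest_series_of_neighbours (my_list : List Int) : Int :=
  (((PySem.List.pyRange 1 (my_list.length : Int) 1).foldl
    (fun (s : Int × Int) (i : Int) =>
      let result : Int :=
        if |PySem.List.pyGetD my_list (i - 1) 0 - PySem.List.pyGetD my_list i 0| = 1
        then s.2 + 1 else 1
      (max s.1 result, result)) (1, 1)).1)

-- ===== PORT B =====
-- Source B's outer while loop over the flag list: each true-run is consumed whole
-- (inner while = takeWhile/dropWhile), false flags are skipped one at a time.
def pvScanRuns : List Bool → Nat → Nat
  | [], best => best
  | true :: fs, best =>
      pvScanRuns (fs.dropWhile (· = true)) (max best (1 + (fs.takeWhile (· = true)).length))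
  | false :: fs, best => pvScanRuns fs best
termination_by fs _ => fs.length
decreasing_by
  · exact Nat.lt_succ_of_le (List.length_dropWhile_le _ _)
  · exact Nat.lt_succ_self _

def longest_series_of_neighbours_alt (my_list : List Int) : Int :=
  let flags := List.zipWith (fun x y => decide (|x - y| = 1)) my_list my_list.tail
  (pvScanRuns flags 0 : Int) + 1

-- ===== PRECONDITION & SPEC =====
def Spec_longest_series_of_neighbours (my_list : List Int) (out : Int) : Prop := out = longest_series_of_neighbours_alt my_list
instance (my_list : List Int) (out : Int) : Decidable (Spec_longest_series_of_neighbours my_list out) := by unfold Spec_longest_series_of_neighbours; infer_instance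

-- ===== CLAIM (what is proved, stated in full; the proofs are below) =====
def Claim_equal_longest_series_of_neighbours : Prop := ∀ (my_list : List Int), Dom_longest_series_of_neighbours my_list → Spec_longest_series_of_neighbours my_list (longest_series_of_neighbours my_list)

-- ===== LEMMAS AND PROOFS =====

-- length of the leading run of `true` flags
def pvLead : List Bool → Nat
  | [] => 0
  | true :: fs => pvLead fs + 1
  | false :: _ => 0

-- longest run of `true` flags strictly after the leading run
def pvMrT : List Bool → Nat
  | [] => 0
  | true :: fs => pvMrT fs
  | false :: fs => max (pvLead fs) (pvMrT fs)

theorem pvLead_eq_takeWhile (fs : List Bool) :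
    pvLead fs = (fs.takeWhile (· = true)).length := by
  induction fs with
  | nil => rfl
  | cons f gs ih => cases f <;> simp [pvLead, List.takeWhile, ih]

theorem pvMrT_eq_dropWhile (fs : List Bool) :
    pvMrT fs = max (pvLead (fs.dropWhile (· = true))) (pvMrT (fs.dropWhile (· = true))) := by
  induction fs with
  | nil => rfl
  | cons f gs ih => cases f <;> simp [pvMrT, pvLead, List.dropWhile, ih]

-- A's loop step over one flag (A's body after substituting `result`)
def pvStep (s : Int × Int) (f : Bool) : Int × Int :=
  (max s.1 (if f then s.2 + 1 else 1), if f then s.2 + 1 else 1)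

theorem pvScanRuns_eq (fs : List Bool) (best : Nat) :
    pvScanRuns fs best = max best (max (pvLead fs) (pvMrT fs)) := by
  induction fs, best using pvScanRuns.induct with
  | case1 best => simp [pvScanRuns, pvLead, pvMrT]
  | case2 gs best ih =>
      rw [pvScanRuns, ih]
      rw [pvLead, pvMrT, ← pvLead_eq_takeWhile, pvMrT_eq_dropWhile gs]
      omega
  | case3 gs best ih =>
      rw [pvScanRuns, ih]
      simp only [pvLead, pvMrT]
      omega

-- A's loop over the flag list, with invariants 1 ≤ r ≤ b
theorem foldlA_eq (fs : List Bool) : ∀ b r : Int, 1 ≤ r → r ≤ b →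
    (fs.foldl pvStep (b, r)).1
      = max b (max (r + (pvLead fs : Int)) (1 + (pvMrT fs : Int))) := by
  induction fs with
  | nil =>
      intro b r h1 h2
      simp only [List.foldl_nil, pvLead, pvMrT]
      omega
  | cons f gs ih =>
      intro b r h1 h2
      cases f with
      | true =>
          simp only [List.foldl_cons, pvStep, if_true, pvLead, pvMrT]
          rw [ih (max b (r + 1)) (r + 1) (by omega) (by omega)]
          push_cast
          omega
      | false =>
          simp only [List.foldl_cons, pvStep, Bool.false_eq_true, if_false, pvLead, pvMrT]
          rw [ih (max b 1) 1 le_rfl (by omega)]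
          push_cast
          omega

-- A's index loop equals the fold over the flag list
theorem flags_map_eq (l : List Int) :
    (PySem.List.pyRange 1 (l.length : Int) 1).map
        (fun i => decide (|PySem.List.pyGetD l (i - 1) 0 - PySem.List.pyGetD l i 0| = 1))
      = List.zipWith (fun x y => decide (|x - y| = 1)) l l.tail := by
  apply List.ext_getElem
  · simp [PySem.List.length_pyRange_one, List.length_zipWith, List.length_tail]
  · intro k hk1 hk2
    simp only [List.getElem_map, PySem.List.getElem_pyRange_one, List.getElem_zipWith]
    have hk : k + 1 < l.length := by
      simp [PySem.List.length_pyRange_one] at hk1; omega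
    have h1 : (1 : Int) + k - 1 = (k : Int) := by omega
    have h2 : (1 : Int) + k = ((k + 1 : Nat) : Int) := by omega
    rw [h1, h2, PySem.List.pyGetD_natCast, PySem.List.pyGetD_natCast]
    rw [List.getD_eq_getElem l 0 (by omega : k < l.length),
        List.getD_eq_getElem l 0 hk, List.getElem_tail]

-- ===== VERDICT (by name: the statement is the Claim_ definition above) =====
theorem portA_bridge (l : List Int) :
    longest_series_of_neighbours l
      = ((List.zipWith (fun x y => decide (|x - y| = 1)) l l.tail).foldl pvStep (1, 1)).1 := by
  rw [longest_series_of_neighbours, ← flags_map_eq l, List.foldl_map]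
  simp only [pvStep, decide_eq_true_eq]

theorem longest_series_of_neighbours_spec : Claim_equal_longest_series_of_neighbours := by
  intro l _
  unfold Spec_longest_series_of_neighbours longest_series_of_neighbours_alt
  rw [portA_bridge l, foldlA_eq _ 1 1 le_rfl le_rfl]
  simp only [pvScanRuns_eq]
  push_cast
  omega
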